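-- pv_equiv track=rewrite | github.com/MKolman/AdventOfCode2019 | day_12.py | gravity
-- ===== SOURCE A (Python) =====
-- def gravity(coor):
--   dv = [[0, 0, 0] for _ in coor]
--   for i, pos1 in enumerate(coor):
--     for j, pos2 in enumerate(coor[:i]):
--       for k, (x1, x2) in enumerate(zip(pos1, pos2)):
--         if x1 < x2:
--           dv[i][k] += 1
--           dv[j][k] -= 1
--         elif x1 > x2:
--           dv[i][k] -= 1
--           dv[j][k] += 1
--   return dv
-- ===== SOURCE B (Python) =====
-- def gravity(coor):
--     dv = []
--     for i, pos1 in enumerate(coor):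
--         row = [0, 0, 0]
--         for j, pos2 in enumerate(coor):
--             if j == i:
--                 continue
--             for k, (x1, x2) in enumerate(zip(pos1, pos2)):
--                 if x1 < x2:
--                     row[k] += 1
--                 elif x1 > x2:
--                     row[k] -= 1
--         dv.append(row)
--     return dv
-- ===== Notes on version B (the rewrite author's own statement) =====
-- stated objective: alternative
-- what changed: A accumulates symmetric in-place +/-1 updates into a mutable dv over the pairs j<i, touching two rows per pair; B builds each moon's row independently in one local accumulator by scanning all other moons, with no shared mutable state and no symmetric double update.
import Mathlib
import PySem

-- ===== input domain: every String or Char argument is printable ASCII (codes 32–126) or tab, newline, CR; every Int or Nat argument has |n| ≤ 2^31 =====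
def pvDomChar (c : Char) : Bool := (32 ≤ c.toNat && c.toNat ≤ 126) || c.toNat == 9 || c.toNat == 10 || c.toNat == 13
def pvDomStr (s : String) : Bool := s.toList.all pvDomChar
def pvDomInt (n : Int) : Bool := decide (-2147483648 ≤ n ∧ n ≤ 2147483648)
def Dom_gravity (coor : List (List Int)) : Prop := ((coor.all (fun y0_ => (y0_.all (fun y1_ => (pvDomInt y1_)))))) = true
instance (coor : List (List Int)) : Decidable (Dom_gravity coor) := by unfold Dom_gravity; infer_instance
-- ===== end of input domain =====

-- B replaces A's symmetric in-place ±1 updates over moon pairs (j < i) by building each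
-- moon's row independently from a scan of all other moons (alternative decomposition,
-- same asymptotic cost).

-- ===== PORT A =====
-- dv[i][k] += d  (Python list indexing/assignment; indices here always come from enumerate, so nonnegative)
def pvBump (dv : List (List Int)) (i k d : Int) : List (List Int) :=
  PySem.List.pySetD dv i
    (PySem.List.pySetD (PySem.List.pyGetD dv i [])
      k (PySem.List.pyGetD (PySem.List.pyGetD dv i []) k 0 + d))

def gravity (coor : List (List Int)) : List (List Int) :=
  let dv := coor.map (fun _ => ([0, 0, 0] : List Int))
  (PySem.List.enumerate coor).foldl (fun dv ip =>
    (PySem.List.enumerate (PySem.List.slice coor none (some ip.1))).foldl (fun dv jp =>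
      (PySem.List.enumerate (ip.2.zip jp.2)).foldl (fun dv kx =>
        if kx.2.1 < kx.2.2 then pvBump (pvBump dv ip.1 kx.1 1) jp.1 kx.1 (-1)
        else if kx.2.1 > kx.2.2 then pvBump (pvBump dv ip.1 kx.1 (-1)) jp.1 kx.1 1
        else dv) dv) dv) dv

-- ===== PORT B =====
-- row[k] += d  (Python list index assignment on the local 3-slot row)
def pvRowBump (row : List Int) (k d : Int) : List Int :=
  PySem.List.pySetD row k (PySem.List.pyGetD row k 0 + d)

def gravity_alt (coor : List (List Int)) : List (List Int) :=
  (PySem.List.enumerate coor).foldl (fun dv ip =>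
    dv ++ [(PySem.List.enumerate coor).foldl (fun row jp =>
      if jp.1 = ip.1 then row
      else (PySem.List.enumerate (ip.2.zip jp.2)).foldl (fun row kx =>
        if kx.2.1 < kx.2.2 then pvRowBump row kx.1 1
        else if kx.2.1 > kx.2.2 then pvRowBump row kx.1 (-1)
        else row) row) [0, 0, 0]]) []

-- ===== PRECONDITION & SPEC =====
-- Pre_ excludes exactly the inputs where Python A raises IndexError (two rows that both
-- have a coordinate at some shared index k ≥ 3 with different values there; the dv rows
-- have only 3 slots).  B raises IndexError on exactly the same inputs.
def Pre_gravity (coor : List (List Int)) : Prop :=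
  ∀ p ∈ coor, ∀ q ∈ coor, ∀ k ∈ List.range (min p.length q.length),
    3 ≤ k → p.getD k 0 = q.getD k 0
instance (coor : List (List Int)) : Decidable (Pre_gravity coor) := by
  unfold Pre_gravity; infer_instance

def pvWitness_gravity : List (List Int) := [[1, 2, 3], [4, 5, 6], [1, 5, 2]]

def Spec_gravity (coor : List (List Int)) (out : List (List Int)) : Prop := out = gravity_alt coor
instance (coor : List (List Int)) (out : List (List Int)) : Decidable (Spec_gravity coor out) := by unfold Spec_gravity; infer_instance

-- ===== CLAIM (what is proved, stated in full; the proofs are below) =====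
def Claim_equal_gravity : Prop := ∀ (coor : List (List Int)), Dom_gravity coor → Pre_gravity coor → Spec_gravity coor (gravity coor)

-- ===== LEMMAS AND PROOFS =====

-- signed comparison: +1 if a < b, -1 if b < a, 0 otherwise
def pvCmp (a b : Int) : Int := if a < b then 1 else if b < a then -1 else 0

-- pairwise contribution of moon j to dv[i][k]
def pvC (coor : List (List Int)) (i j k : Nat) : Int :=
  if k < 3 ∧ k < (coor.getD i []).length ∧ k < (coor.getD j []).length then
    pvCmp ((coor.getD i []).getD k 0) ((coor.getD j []).getD k 0)
  else 0

-- cell accessor and shape predicate for A's dv state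
def pvCel (dv : List (List Int)) (i k : Nat) : Int := (dv.getD i []).getD k 0

def pvShp (n : Nat) (dv : List (List Int)) : Prop :=
  dv.length = n ∧ ∀ r ∈ dv, r.length = 3

-- per-outer-iteration total delta to cell (i',k') in A's loop
def pvH (coor : List (List Int)) (i' k' iN : Nat) : Int :=
  (if iN = i' then ((List.range iN).map (fun j => pvC coor iN j k')).sum else 0)
  + (if i' < iN then - pvC coor iN i' k' else 0)

-- named forms of A's three loop bodies
def pvStepK (iN jN : Nat) (p1 p2 : List Int) (dv : List (List Int)) (kN : Nat) :
    List (List Int) :=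
  if p1.getD kN 0 < p2.getD kN 0 then
    pvBump (pvBump dv (iN : Int) (kN : Int) 1) (jN : Int) (kN : Int) (-1)
  else if p2.getD kN 0 < p1.getD kN 0 then
    pvBump (pvBump dv (iN : Int) (kN : Int) (-1)) (jN : Int) (kN : Int) 1
  else dv

def pvStepJ (coor : List (List Int)) (iN : Nat) (dv : List (List Int)) (jN : Nat) :
    List (List Int) :=
  (List.range (min (coor.getD iN []).length (coor.getD jN []).length)).foldl
    (pvStepK iN jN (coor.getD iN []) (coor.getD jN [])) dv

def pvStepI (coor : List (List Int)) (dv : List (List Int)) (iN : Nat) : List (List Int) :=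
  (List.range iN).foldl (pvStepJ coor iN) dv

-- named forms of B's inner loop bodies
def pvRowStepK (p1 p2 : List Int) (row : List Int) (kN : Nat) : List Int :=
  if p1.getD kN 0 < p2.getD kN 0 then pvRowBump row (kN : Int) 1
  else if p2.getD kN 0 < p1.getD kN 0 then pvRowBump row (kN : Int) (-1)
  else row

def pvRowStepJ (coor : List (List Int)) (iN : Nat) (row : List Int) (jN : Nat) : List Int :=
  if jN = iN then row
  else (List.range (min (coor.getD iN []).length (coor.getD jN []).length)).foldl
    (pvRowStepK (coor.getD iN []) (coor.getD jN [])) row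

lemma pvEnum {α : Type} (xs : List α) (d : α) :
    PySem.List.enumerate xs
      = (List.range xs.length).map (fun j : Nat => ((j : Int), xs.getD j d)) := by
  rw [PySem.List.enumerate_eq_map_pyRange xs d, PySem.List.pyRange_one, List.map_map]
  have hb : ((PySem.List.len xs : Int) - 0).toNat = xs.length := by
    simp [PySem.List.len]
  rw [hb]
  apply List.map_congr_left
  intro a _
  simp

lemma pvCmp_neg (a b : Int) : pvCmp a b = - pvCmp b a := by
  unfold pvCmp; split_ifs <;> omega

lemma pvC_antisymm (coor : List (List Int)) (i j k : Nat) :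
    pvC coor i j k = - pvC coor j i k := by
  unfold pvC
  by_cases h : k < 3 ∧ k < (coor.getD i []).length ∧ k < (coor.getD j []).length
  · rw [if_pos h, if_pos ⟨h.1, h.2.2, h.2.1⟩]
    exact pvCmp_neg _ _
  · rw [if_neg h, if_neg (fun hc => h ⟨hc.1, hc.2.2, hc.2.1⟩)]
    simp

lemma pvGetD3 (k : Nat) : ([0, 0, 0] : List Int).getD k 0 = 0 := by
  rcases k with _ | _ | _ | k <;> simp [List.getD]

lemma pvRow_getD_set (row : List Int) (kN k' : Nat) (v : Int) :
    (row.set kN v).getD k' 0 = if kN = k' ∧ kN < row.length then v else row.getD k' 0 := by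
  rw [List.getD_eq_getElem?_getD, List.getElem?_set]
  by_cases h1 : kN = k'
  · subst h1
    by_cases h2 : kN < row.length
    · simp [h2]
    · rw [if_pos rfl, if_neg h2, if_neg (fun hc => h2 hc.2)]
      rw [List.getD_eq_default _ _ (by omega)]
      rfl
  · rw [if_neg h1, if_neg (fun hc => h1 hc.1), List.getD_eq_getElem?_getD]

lemma pvGetD_set (dv : List (List Int)) (iN i' : Nat) (r : List Int) :
    (dv.set iN r).getD i' [] = if iN = i' ∧ iN < dv.length then r else dv.getD i' [] := by
  rw [List.getD_eq_getElem?_getD, List.getElem?_set]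
  by_cases h1 : iN = i'
  · subst h1
    by_cases h2 : iN < dv.length
    · simp [h2]
    · rw [if_pos rfl, if_neg h2, if_neg (fun hc => h2 hc.2)]
      rw [List.getD_eq_default _ _ (by omega)]
      rfl
  · rw [if_neg h1, if_neg (fun hc => h1 hc.1), List.getD_eq_getElem?_getD]

lemma pvSet_oob {α : Type} (l : List α) (i : Nat) (a : α) (h : l.length ≤ i) :
    l.set i a = l := by
  apply List.ext_getElem (by simp)
  intro j h1 h2
  rw [List.getElem_set]
  have : ¬ i = j := by simp at h1; omega
  simp [this]

lemma pvShp_getD_len {n : Nat} {dv : List (List Int)} (h : pvShp n dv) (i : Nat) :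
    (dv.getD i []).length = if i < n then 3 else 0 := by
  rcases h with ⟨hl, hr⟩
  by_cases hi : i < n
  · rw [List.getD_eq_getElem _ _ (by omega), if_pos hi]
    exact hr _ (List.getElem_mem _)
  · rw [List.getD_eq_default _ _ (by omega), if_neg hi]
    rfl

lemma pvBump_cel {n : Nat} {dv : List (List Int)} (h : pvShp n dv) (iN kN : Nat)
    (d : Int) (i' k' : Nat) :
    pvShp n (pvBump dv (iN : Int) (kN : Int) d) ∧
    pvCel (pvBump dv (iN : Int) (kN : Int) d) i' k'
      = pvCel dv i' k' + (if iN = i' ∧ kN = k' ∧ i' < n ∧ k' < 3 then d else 0) := by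
  have hrl := pvShp_getD_len h iN
  obtain ⟨hl, hr⟩ := h
  simp only [pvBump, PySem.List.pySetD_natCast, PySem.List.pyGetD_natCast]
  constructor
  · by_cases hi : iN < dv.length
    · refine ⟨by simp [hl], ?_⟩
      intro x hx
      rcases List.mem_or_eq_of_mem_set hx with hm | rfl
      · exact hr x hm
      · rw [List.length_set]
        have hin : iN < n := by omega
        rw [if_pos hin] at hrl
        exact hrl
    · rw [pvSet_oob _ _ _ (by omega)]
      exact ⟨hl, hr⟩
  · unfold pvCel
    rw [pvGetD_set]
    by_cases h1 : iN = i' ∧ iN < dv.length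
    · obtain ⟨rfl, hlt⟩ := h1
      have hin : iN < n := by omega
      rw [if_pos hin] at hrl
      rw [if_pos ⟨rfl, hlt⟩, pvRow_getD_set]
      by_cases h2 : kN = k' ∧ kN < (dv.getD iN []).length
      · obtain ⟨rfl, hklt⟩ := h2
        rw [if_pos ⟨rfl, hklt⟩, if_pos ⟨rfl, rfl, hin, by omega⟩]
      · rw [if_neg h2, if_neg (fun hc => h2 ⟨hc.2.1, by
          have e1 := hc.2.1
          have e2 := hc.2.2.2
          omega⟩)]
        simp
    · rw [if_neg h1, if_neg (fun hc => h1 ⟨hc.1, by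
        have := hc.2.2.1
        omega⟩)]
      simp

lemma pvFoldl_cel {α : Type} {n : Nat} (i' k' : Nat)
    (f : List (List Int) → α → List (List Int)) (δ : α → Int) :
    ∀ (L : List α),
      (∀ dv a, a ∈ L → pvShp n dv →
        pvShp n (f dv a) ∧ pvCel (f dv a) i' k' = pvCel dv i' k' + δ a) →
      ∀ dv, pvShp n dv →
        pvShp n (L.foldl f dv) ∧
        pvCel (L.foldl f dv) i' k' = pvCel dv i' k' + (L.map δ).sum
  | [], _, dv, hdv => by simpa using hdv
  | a :: L, hstep, dv, hdv => by
      obtain ⟨h1, h2⟩ := hstep dv a (by simp) hdv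
      obtain ⟨h3, h4⟩ := pvFoldl_cel i' k' f δ L
        (fun dv b hb => hstep dv b (by simp [hb])) (f dv a) h1
      refine ⟨by simpa using h3, ?_⟩
      simp only [List.foldl_cons, List.map_cons, List.sum_cons]
      rw [h4, h2]; ring

lemma pvSum_range_ite (n k' : Nat) (g : Nat → Int) :
    ((List.range n).map (fun j => if j = k' then g j else 0)).sum
      = if k' < n then g k' else 0 := by
  induction n with
  | zero => simp
  | succ m ih =>
      rw [List.range_succ, List.map_append, List.sum_append, ih]
      simp only [List.map_cons, List.map_nil, List.sum_cons, List.sum_nil]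
      rcases Nat.lt_trichotomy k' m with h | rfl | h
      · rw [if_pos h, if_neg (by omega : ¬ m = k'), if_pos (by omega)]
        ring
      · rw [if_neg (by omega : ¬ k' < k'), if_pos rfl, if_pos (by omega)]
        ring
      · rw [if_neg (by omega : ¬ k' < m), if_neg (by omega : ¬ m = k'),
          if_neg (by omega : ¬ k' < m + 1)]
        ring

-- value of a cell of the zipped pair list
lemma pvZip_getD (p1 p2 : List Int) (kN : Nat) (hk : kN < (p1.zip p2).length) :
    (p1.zip p2).getD kN (0, 0) = (p1.getD kN 0, p2.getD kN 0) := by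
  have h1 : kN < p1.length := by rw [List.length_zip] at hk; omega
  have h2 : kN < p2.length := by rw [List.length_zip] at hk; omega
  rw [List.getD_eq_getElem _ _ hk, List.getElem_zip,
    List.getD_eq_getElem _ _ h1, List.getD_eq_getElem _ _ h2]

-- A's fold, rewritten with the named step functions
lemma pvGravity_eq (coor : List (List Int)) :
    gravity coor = (List.range coor.length).foldl (pvStepI coor)
      (coor.map (fun _ => ([0, 0, 0] : List Int))) := by
  simp only [gravity]
  rw [pvEnum coor [], List.foldl_map]
  apply PySem.List.foldl_congr_mem
  intro dv iN hiN
  dsimp only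
  have hiNn : iN < coor.length := List.mem_range.1 hiN
  rw [PySem.List.slice_to_natCast, pvEnum (List.take iN coor) [], List.foldl_map]
  have htl : (List.take iN coor).length = iN := by rw [List.length_take]; omega
  rw [htl]
  unfold pvStepI
  apply PySem.List.foldl_congr_mem
  intro dv jN hjN
  dsimp only
  have hjNi : jN < iN := List.mem_range.1 hjN
  have hjlt : (List.take iN coor).getD jN [] = coor.getD jN [] := by
    rw [List.getD_eq_getElem _ _ (by rw [htl]; omega), List.getElem_take,
      List.getD_eq_getElem _ _ (by omega)]
  rw [hjlt]
  rw [pvEnum ((coor.getD iN []).zip (coor.getD jN [])) (0, 0), List.foldl_map]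
  unfold pvStepJ
  rw [show min (coor.getD iN []).length (coor.getD jN []).length
      = ((coor.getD iN []).zip (coor.getD jN [])).length from List.length_zip.symm]
  apply PySem.List.foldl_congr_mem
  intro dv kN hkN
  dsimp only
  have hkz : kN < ((coor.getD iN []).zip (coor.getD jN [])).length := List.mem_range.1 hkN
  rw [pvZip_getD _ _ kN hkz]
  unfold pvStepK
  dsimp only

lemma pvStepK_cel {n : Nat} (iN jN kN : Nat) (p1 p2 : List Int)
    {dv : List (List Int)} (hdv : pvShp n dv) (i' k' : Nat) :
    pvShp n (pvStepK iN jN p1 p2 dv kN) ∧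
    pvCel (pvStepK iN jN p1 p2 dv kN) i' k' = pvCel dv i' k'
      + ((if iN = i' ∧ kN = k' ∧ i' < n ∧ k' < 3
            then pvCmp (p1.getD kN 0) (p2.getD kN 0) else 0)
        + (if jN = i' ∧ kN = k' ∧ i' < n ∧ k' < 3
            then - pvCmp (p1.getD kN 0) (p2.getD kN 0) else 0)) := by
  unfold pvStepK
  rcases Int.lt_trichotomy (p1.getD kN 0) (p2.getD kN 0) with hlt | heq | hgt
  · rw [if_pos hlt]
    obtain ⟨s1, c1⟩ := pvBump_cel hdv iN kN 1 i' k'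
    obtain ⟨s2, c2⟩ := pvBump_cel s1 jN kN (-1) i' k'
    refine ⟨s2, ?_⟩
    rw [c2, c1]
    have hc : pvCmp (p1.getD kN 0) (p2.getD kN 0) = 1 := by
      unfold pvCmp; rw [if_pos hlt]
    rw [hc]
    split_ifs <;> ring
  · rw [if_neg (by omega), if_neg (by omega)]
    refine ⟨hdv, ?_⟩
    have hc : pvCmp (p1.getD kN 0) (p2.getD kN 0) = 0 := by
      unfold pvCmp; rw [if_neg (by omega), if_neg (by omega)]
    rw [hc]
    simp
  · rw [if_neg (by omega), if_pos hgt]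
    obtain ⟨s1, c1⟩ := pvBump_cel hdv iN kN (-1) i' k'
    obtain ⟨s2, c2⟩ := pvBump_cel s1 jN kN 1 i' k'
    refine ⟨s2, ?_⟩
    rw [c2, c1]
    have hc : pvCmp (p1.getD kN 0) (p2.getD kN 0) = -1 := by
      unfold pvCmp; rw [if_neg (by omega), if_pos hgt]
    rw [hc]
    split_ifs <;> ring

lemma pvStepJ_cel (coor : List (List Int)) (iN jN : Nat) (hiN : iN < coor.length)
    (hjN : jN < iN) {dv : List (List Int)} (hdv : pvShp coor.length dv) (i' k' : Nat) :
    pvShp coor.length (pvStepJ coor iN dv jN) ∧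
    pvCel (pvStepJ coor iN dv jN) i' k' = pvCel dv i' k'
      + ((if iN = i' then pvC coor iN jN k' else 0)
        + (if jN = i' then - pvC coor iN jN k' else 0)) := by
  unfold pvStepJ
  obtain ⟨hs, hc⟩ := pvFoldl_cel (n := coor.length) i' k'
    (pvStepK iN jN (coor.getD iN []) (coor.getD jN []))
    (fun kN => (if iN = i' ∧ kN = k' ∧ i' < coor.length ∧ k' < 3
        then pvCmp ((coor.getD iN []).getD kN 0) ((coor.getD jN []).getD kN 0) else 0)
      + (if jN = i' ∧ kN = k' ∧ i' < coor.length ∧ k' < 3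
        then - pvCmp ((coor.getD iN []).getD kN 0) ((coor.getD jN []).getD kN 0) else 0))
    (List.range (min (coor.getD iN []).length (coor.getD jN []).length))
    (fun dv kN _ hdv => pvStepK_cel iN jN kN _ _ hdv i' k') dv hdv
  refine ⟨hs, ?_⟩
  rw [hc]
  congr 1
  rw [PySem.List.sum_map_add_int]
  congr 1
  · rw [List.map_congr_left (g := fun kN => if kN = k' then
        (if iN = i' ∧ i' < coor.length ∧ k' < 3
          then pvCmp ((coor.getD iN []).getD kN 0) ((coor.getD jN []).getD kN 0) else 0)
        else 0)
      (by intro a _; dsimp only; split_ifs <;> first | rfl | tauto)]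
    rw [pvSum_range_ite]
    unfold pvC
    by_cases hii : iN = i'
    · subst hii
      by_cases hk3 : k' < 3 <;>
        by_cases hk1 : k' < (coor.getD iN []).length <;>
        by_cases hk2 : k' < (coor.getD jN []).length <;>
        simp [hk3, hk1, hk2, hiN] <;> omega
    · rw [if_neg (show ¬(iN = i' ∧ i' < coor.length ∧ k' < 3) from fun hc => hii hc.1),
        ite_self, if_neg hii]
  · rw [List.map_congr_left (g := fun kN => if kN = k' then
        (if jN = i' ∧ i' < coor.length ∧ k' < 3
          then - pvCmp ((coor.getD iN []).getD kN 0) ((coor.getD jN []).getD kN 0) else 0)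
        else 0)
      (by intro a _; dsimp only; split_ifs <;> first | rfl | tauto)]
    rw [pvSum_range_ite]
    unfold pvC
    by_cases hjj : jN = i'
    · subst hjj
      have hjn : jN < coor.length := by omega
      by_cases hk3 : k' < 3 <;>
        by_cases hk1 : k' < (coor.getD iN []).length <;>
        by_cases hk2 : k' < (coor.getD jN []).length <;>
        simp [hk3, hk1, hk2, hjn] <;> omega
    · rw [if_neg (show ¬(jN = i' ∧ i' < coor.length ∧ k' < 3) from fun hc => hjj hc.1),
        ite_self, if_neg hjj]

lemma pvStepI_cel (coor : List (List Int)) (iN : Nat) (hiN : iN < coor.length)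
    {dv : List (List Int)} (hdv : pvShp coor.length dv) (i' k' : Nat) :
    pvShp coor.length (pvStepI coor dv iN) ∧
    pvCel (pvStepI coor dv iN) i' k' = pvCel dv i' k' + pvH coor i' k' iN := by
  unfold pvStepI
  obtain ⟨hs, hc⟩ := pvFoldl_cel (n := coor.length) i' k'
    (pvStepJ coor iN)
    (fun jN => (if iN = i' then pvC coor iN jN k' else 0)
      + (if jN = i' then - pvC coor iN jN k' else 0))
    (List.range iN)
    (fun dv jN hjN hdv => pvStepJ_cel coor iN jN hiN (List.mem_range.1 hjN) hdv i' k')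
    dv hdv
  refine ⟨hs, ?_⟩
  rw [hc]
  congr 1
  rw [PySem.List.sum_map_add_int]
  unfold pvH
  congr 1
  · by_cases hii : iN = i'
    · rw [if_pos hii]
      apply congrArg List.sum
      apply List.map_congr_left
      intro a _
      rw [if_pos hii, hii]
    · rw [if_neg hii]
      rw [List.map_congr_left (g := fun _ => (0 : Int)) (fun a _ => if_neg hii)]
      simp
  · rw [pvSum_range_ite iN i' (fun j => - pvC coor iN j k')]

-- A's characterization: shape + cell values
lemma pvA_char (coor : List (List Int)) (i' k' : Nat) :
    pvShp coor.length (gravity coor) ∧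
    pvCel (gravity coor) i' k'
      = ((List.range coor.length).map (pvH coor i' k')).sum := by
  have hdv0 : pvShp coor.length (coor.map (fun _ => ([0, 0, 0] : List Int))) := by
    refine ⟨by rw [List.length_map], ?_⟩
    intro r hr
    rcases List.mem_map.1 hr with ⟨x, -, rfl⟩
    rfl
  have hcel0 : pvCel (coor.map (fun _ => ([0, 0, 0] : List Int))) i' k' = 0 := by
    unfold pvCel
    by_cases hi : i' < coor.length
    · rw [List.getD_eq_getElem (coor.map (fun _ => ([0, 0, 0] : List Int))) []
        (by rw [List.length_map]; omega : i' < (coor.map (fun _ => ([0, 0, 0] : List Int))).length)]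
      rw [List.getElem_map]
      exact pvGetD3 k'
    · rw [List.getD_eq_default (coor.map (fun _ => ([0, 0, 0] : List Int))) []
        (by rw [List.length_map]; omega : (coor.map (fun _ => ([0, 0, 0] : List Int))).length ≤ i')]
      rfl
  rw [pvGravity_eq]
  obtain ⟨hs, hc⟩ := pvFoldl_cel (n := coor.length) i' k' (pvStepI coor) (pvH coor i' k')
    (List.range coor.length)
    (fun dv iN hiN hdv => pvStepI_cel coor iN (List.mem_range.1 hiN) hdv i' k')
    _ hdv0
  exact ⟨hs, by rw [hc, hcel0, zero_add]⟩

-- A's per-iteration deltas total to the one-sided per-cell sum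
lemma pvSum_eq (coor : List (List Int)) (i' k' : Nat) :
    ∀ n, i' < n →
      ((List.range n).map (pvH coor i' k')).sum
        = ((List.range n).map (fun j => if j = i' then 0 else pvC coor i' j k')).sum := by
  intro n
  induction n with
  | zero => omega
  | succ m ih =>
      intro hi
      rw [List.range_succ, List.map_append, List.sum_append,
        List.map_append, List.sum_append]
      simp only [List.map_cons, List.map_nil, List.sum_cons, List.sum_nil]
      by_cases him : i' < m
      · rw [ih him]
        congr 1
        unfold pvH
        rw [if_neg (by omega : ¬ m = i'), if_pos him, if_neg (by omega : ¬ m = i'),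
          pvC_antisymm coor m i' k']
        ring
      · have hieq : i' = m := by omega
        subst hieq
        have hz : ((List.range i').map (pvH coor i' k')).sum = 0 := by
          rw [List.map_congr_left (g := fun _ => (0 : Int)) ?_]
          · simp
          · intro a ha
            have haa : a < i' := List.mem_range.1 ha
            unfold pvH
            rw [if_neg (by omega), if_neg (by omega)]
            simp
        have hcg := congrArg List.sum
          (List.map_congr_left (l := List.range i')
            (f := fun j => if j = i' then 0 else pvC coor i' j k')
            (g := fun j => pvC coor i' j k')
            (fun a ha => if_neg (by have := List.mem_range.1 ha; omega)))
        rw [hz, hcg]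
        unfold pvH
        rw [if_pos rfl, if_neg (by omega : ¬ i' < i'), if_pos rfl]
        ring

-- B-side: one row bump
lemma pvRowBump_cel {row : List Int} (h : row.length = 3) (kN : Nat) (d : Int) (k' : Nat) :
    (pvRowBump row (kN : Int) d).length = 3 ∧
    (pvRowBump row (kN : Int) d).getD k' 0
      = row.getD k' 0 + (if kN = k' ∧ k' < 3 then d else 0) := by
  simp only [pvRowBump, PySem.List.pySetD_natCast, PySem.List.pyGetD_natCast]
  refine ⟨by simp [h], ?_⟩
  rw [pvRow_getD_set]
  by_cases h1 : kN = k' ∧ kN < row.length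
  · obtain ⟨rfl, hlt⟩ := h1
    rw [if_pos ⟨rfl, hlt⟩, if_pos ⟨rfl, by omega⟩]
  · rw [if_neg h1, if_neg (fun hc => h1 ⟨hc.1, by omega⟩)]
    simp

-- generic fold over a 3-slot row with additive cell deltas
lemma pvFoldlRow {α : Type} (k' : Nat) (f : List Int → α → List Int) (δ : α → Int) :
    ∀ (L : List α),
      (∀ row a, a ∈ L → row.length = 3 →
        (f row a).length = 3 ∧ (f row a).getD k' 0 = row.getD k' 0 + δ a) →
      ∀ row, row.length = 3 →
        (L.foldl f row).length = 3 ∧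
        (L.foldl f row).getD k' 0 = row.getD k' 0 + (L.map δ).sum
  | [], _, row, hrow => by simpa using hrow
  | a :: L, hstep, row, hrow => by
      obtain ⟨h1, h2⟩ := hstep row a (by simp) hrow
      obtain ⟨h3, h4⟩ := pvFoldlRow k' f δ L
        (fun row b hb => hstep row b (by simp [hb])) (f row a) h1
      refine ⟨by simpa using h3, ?_⟩
      simp only [List.foldl_cons, List.map_cons, List.sum_cons]
      rw [h4, h2]; ring

lemma pvRowStepK_cel (kN : Nat) (p1 p2 : List Int) {row : List Int}
    (hrow : row.length = 3) (k' : Nat) :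
    (pvRowStepK p1 p2 row kN).length = 3 ∧
    (pvRowStepK p1 p2 row kN).getD k' 0 = row.getD k' 0
      + (if kN = k' ∧ k' < 3 then pvCmp (p1.getD kN 0) (p2.getD kN 0) else 0) := by
  unfold pvRowStepK
  rcases Int.lt_trichotomy (p1.getD kN 0) (p2.getD kN 0) with hlt | heq | hgt
  · rw [if_pos hlt]
    obtain ⟨s1, c1⟩ := pvRowBump_cel hrow kN 1 k'
    refine ⟨s1, ?_⟩
    rw [c1]
    have hc : pvCmp (p1.getD kN 0) (p2.getD kN 0) = 1 := by
      unfold pvCmp; rw [if_pos hlt]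
    rw [hc]
  · rw [if_neg (by omega), if_neg (by omega)]
    refine ⟨hrow, ?_⟩
    have hc : pvCmp (p1.getD kN 0) (p2.getD kN 0) = 0 := by
      unfold pvCmp; rw [if_neg (by omega), if_neg (by omega)]
    rw [hc]
    simp
  · rw [if_neg (by omega), if_pos hgt]
    obtain ⟨s1, c1⟩ := pvRowBump_cel hrow kN (-1) k'
    refine ⟨s1, ?_⟩
    rw [c1]
    have hc : pvCmp (p1.getD kN 0) (p2.getD kN 0) = -1 := by
      unfold pvCmp; rw [if_neg (by omega), if_pos hgt]
    rw [hc]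

lemma pvRowStepJ_cel (coor : List (List Int)) (iN jN : Nat)
    {row : List Int} (hrow : row.length = 3) (k' : Nat) :
    (pvRowStepJ coor iN row jN).length = 3 ∧
    (pvRowStepJ coor iN row jN).getD k' 0 = row.getD k' 0
      + (if jN = iN then 0 else pvC coor iN jN k') := by
  unfold pvRowStepJ
  by_cases hji : jN = iN
  · rw [if_pos hji, if_pos hji]
    exact ⟨hrow, by simp⟩
  · rw [if_neg hji, if_neg hji]
    obtain ⟨hs, hc⟩ := pvFoldlRow k'
      (pvRowStepK (coor.getD iN []) (coor.getD jN []))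
      (fun kN => if kN = k' ∧ k' < 3
        then pvCmp ((coor.getD iN []).getD kN 0) ((coor.getD jN []).getD kN 0) else 0)
      (List.range (min (coor.getD iN []).length (coor.getD jN []).length))
      (fun row kN _ hrow => pvRowStepK_cel kN _ _ hrow k') row hrow
    refine ⟨hs, ?_⟩
    rw [hc]
    congr 1
    rw [List.map_congr_left (g := fun kN => if kN = k' then
        (if k' < 3
          then pvCmp ((coor.getD iN []).getD kN 0) ((coor.getD jN []).getD kN 0) else 0)
        else 0)
      (by intro a _; dsimp only; split_ifs <;> first | rfl | tauto)]
    rw [pvSum_range_ite]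
    unfold pvC
    by_cases hk3 : k' < 3 <;>
      by_cases hk1 : k' < (coor.getD iN []).length <;>
      by_cases hk2 : k' < (coor.getD jN []).length <;>
      simp [hk3, hk1, hk2] <;> omega

-- B's fold, rewritten with the named step functions
lemma pvB_rows (coor : List (List Int)) :
    gravity_alt coor = (List.range coor.length).map (fun iN : Nat =>
      (List.range coor.length).foldl (pvRowStepJ coor iN) [0, 0, 0]) := by
  unfold gravity_alt
  rw [pvEnum coor [], List.foldl_map]
  rw [PySem.List.foldl_append_singleton_eq_map, List.nil_append]
  apply List.map_congr_left
  intro iN _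
  rw [List.foldl_map]
  dsimp only
  apply PySem.List.foldl_congr_mem
  intro row jN _
  dsimp only
  unfold pvRowStepJ
  by_cases hji : jN = iN
  · rw [if_pos (show ((jN : Int) = (iN : Int)) by exact_mod_cast hji), if_pos hji]
  · rw [if_neg (show ¬((jN : Int) = (iN : Int)) by exact_mod_cast hji), if_neg hji]
    rw [pvEnum ((coor.getD iN []).zip (coor.getD jN [])) (0, 0), List.foldl_map]
    rw [show min (coor.getD iN []).length (coor.getD jN []).length
        = ((coor.getD iN []).zip (coor.getD jN [])).length from List.length_zip.symm]
    apply PySem.List.foldl_congr_mem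
    intro row kN hkN
    dsimp only
    have hkz : kN < ((coor.getD iN []).zip (coor.getD jN [])).length := List.mem_range.1 hkN
    rw [pvZip_getD _ _ kN hkz]
    unfold pvRowStepK
    dsimp only

-- B's row characterization: shape + cell values
lemma pvB_row_cel (coor : List (List Int)) (iN k' : Nat) :
    ((List.range coor.length).foldl (pvRowStepJ coor iN) [0, 0, 0]).length = 3 ∧
    ((List.range coor.length).foldl (pvRowStepJ coor iN) [0, 0, 0]).getD k' 0
      = ((List.range coor.length).map
          (fun j => if j = iN then 0 else pvC coor iN j k')).sum := by
  obtain ⟨hs, hc⟩ := pvFoldlRow k' (pvRowStepJ coor iN)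
    (fun jN => if jN = iN then 0 else pvC coor iN jN k')
    (List.range coor.length)
    (fun row jN _ hrow => pvRowStepJ_cel coor iN jN hrow k')
    [0, 0, 0] (by rfl)
  exact ⟨hs, by rw [hc, pvGetD3, zero_add]⟩

-- ===== VERDICT (by name: the statement is the Claim_ definition above) =====
theorem gravity_spec : Claim_equal_gravity := by
  intro coor _ _
  unfold Spec_gravity
  obtain ⟨hshp, -⟩ := pvA_char coor 0 0
  rw [pvB_rows]
  apply List.ext_getElem
  · rw [hshp.1]; simp
  · intro i h1 h2
    rw [List.getElem_map, List.getElem_range]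
    have hin : i < coor.length := by simpa using h2
    have hrow : (gravity coor)[i].length = 3 := hshp.2 _ (List.getElem_mem _)
    have hblen : ((List.range coor.length).foldl (pvRowStepJ coor i) [0, 0, 0]).length = 3 :=
      (pvB_row_cel coor i 0).1
    apply List.ext_getElem (by rw [hrow, hblen])
    intro k hk1 hk2
    have hk3 : k < 3 := by rw [hrow] at hk1; exact hk1
    have hcell : (gravity coor)[i][k] = pvCel (gravity coor) i k := by
      unfold pvCel
      rw [List.getD_eq_getElem _ _ h1, List.getD_eq_getElem _ _ (by omega)]
    rw [hcell, (pvA_char coor i k).2, pvSum_eq coor i k coor.length hin]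
    rw [show ((List.range coor.length).foldl (pvRowStepJ coor i) [0, 0, 0])[k]
        = ((List.range coor.length).foldl (pvRowStepJ coor i) [0, 0, 0]).getD k 0 from
      (List.getD_eq_getElem _ _ hk2).symm]
    rw [(pvB_row_cel coor i k).2]
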